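-- pv_equiv track=rewrite | github.com/nagarishitaupputuri2007/pm-gpt | product/strategy_resolver.py | _resolve_kano
-- ===== SOURCE A (Python) =====
-- from typing import List, Dict
--
-- def _resolve_kano(features: List[str]) -> List[Dict]:
--     resolved = []
--
--     for idx, f in enumerate(features):
--         if idx < 2:
--             klass = "Basic"
--         elif idx < 4:
--             klass = "Performance"
--         else:
--             klass = "Delighter"
--
--         resolved.append({
--             "feature": f,
--             "score": klass
--         })
--
--     priority = {"Delighter": 3, "Performance": 2, "Basic": 1}
--
--     return sorted(
--         resolved,
--         key=lambda x: priority[x["score"]],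
--         reverse=True
--     )
-- ===== SOURCE B (Python) =====
-- from typing import List, Dict
--
-- def _resolve_kano(features: List[str]) -> List[Dict]:
--     basic, performance, delighter = [], [], []
--     for idx, f in enumerate(features):
--         if idx < 2:
--             bucket = basic
--             klass = "Basic"
--         elif idx < 4:
--             bucket = performance
--             klass = "Performance"
--         else:
--             bucket = delighter
--             klass = "Delighter"
--         bucket.append({"feature": f, "score": klass})
--     return delighter + performance + basic
-- ===== Notes on version B (the rewrite author's own statement) =====
-- stated objective: simpler
-- what changed: B distributes features into three pre-created tier buckets in one enumerate pass and returns delighter+performance+basic concatenated, eliminating A's priority dict and the stable sorted() call with a key function.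
import Mathlib
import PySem

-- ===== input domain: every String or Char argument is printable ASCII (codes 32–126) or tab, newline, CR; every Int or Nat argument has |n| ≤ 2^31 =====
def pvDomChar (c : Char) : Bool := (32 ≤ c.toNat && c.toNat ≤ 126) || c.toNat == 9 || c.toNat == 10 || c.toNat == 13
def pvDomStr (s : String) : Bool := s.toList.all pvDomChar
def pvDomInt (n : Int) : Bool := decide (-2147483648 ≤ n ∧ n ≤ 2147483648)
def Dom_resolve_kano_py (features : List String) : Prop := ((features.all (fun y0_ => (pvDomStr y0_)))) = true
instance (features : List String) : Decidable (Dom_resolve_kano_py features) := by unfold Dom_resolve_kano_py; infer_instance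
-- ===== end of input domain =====

-- B buckets features into three tier lists in one pass and concatenates, instead of A's sorted() with a priority-dict key (objective: simpler).

-- ===== PORT A =====
-- x["score"] is ported with getD: every dict built by the loop carries a "score" key, so the
-- lookup never raises and getD is exact here; likewise priority[klass] always hits a key.
def resolve_kano_py (features : List String) : List (List (String × String)) :=
  let resolved := (PySem.List.enumerate features 0).foldl
    (fun acc p =>
      let klass := if p.1 < 2 then "Basic" else if p.1 < 4 then "Performance" else "Delighter"
      acc ++ [[("feature", p.2), ("score", klass)]]) []
  let priority : PySem.Dict String Int := PySem.Dict.ofList [("Delighter", 3), ("Performance", 2), ("Basic", 1)]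
  PySem.List.sorted resolved
    (fun x => PySem.Dict.getD priority (PySem.Dict.getD (PySem.Dict.mk x) "score" "") 0) true

-- ===== PORT B =====
def resolve_kano_py_alt (features : List String) : List (List (String × String)) :=
  let st := (PySem.List.enumerate features 0).foldl
    (fun (st : List (List (String × String)) × List (List (String × String)) × List (List (String × String))) p =>
      if p.1 < 2 then (st.1 ++ [[("feature", p.2), ("score", "Basic")]], st.2.1, st.2.2)
      else if p.1 < 4 then (st.1, st.2.1 ++ [[("feature", p.2), ("score", "Performance")]], st.2.2)
      else (st.1, st.2.1, st.2.2 ++ [[("feature", p.2), ("score", "Delighter")]]))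
    ([], [], [])
  st.2.2 ++ st.2.1 ++ st.1

-- ===== PRECONDITION & SPEC =====
def Spec_resolve_kano_py (features : List String) (out : List (List (String × String))) : Prop := out = resolve_kano_py_alt features
instance (features : List String) (out : List (List (String × String))) : Decidable (Spec_resolve_kano_py features out) := by unfold Spec_resolve_kano_py; infer_instance

-- ===== CLAIM (what is proved, stated in full; the proofs are below) =====
def Claim_equal_resolve_kano_py : Prop := ∀ (features : List String), Dom_resolve_kano_py features → Spec_resolve_kano_py features (resolve_kano_py features)

-- ===== LEMMAS AND PROOFS =====

-- A dict row for feature f with tier k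
def pvF (f k : String) : List (String × String) := [("feature", f), ("score", k)]

-- A's sort key
def pvKey (x : List (String × String)) : Int :=
  PySem.Dict.getD (PySem.Dict.ofList [("Delighter", (3 : Int)), ("Performance", 2), ("Basic", 1)])
    (PySem.Dict.getD (PySem.Dict.mk x) "score" "") 0

lemma pvKey_F_D (f : String) : pvKey (pvF f "Delighter") = 3 := rfl
lemma pvKey_F_P (f : String) : pvKey (pvF f "Performance") = 2 := rfl
lemma pvKey_F_B (f : String) : pvKey (pvF f "Basic") = 1 := rfl

-- insertBy comparator used by sorted … true with key pvKey
def pvBef (a b : List (String × String)) : Bool := decide (pvKey b < pvKey a)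

lemma enumerate_cons {α : Type} (x : α) (t : List α) (s : Int) :
    PySem.List.enumerate (x :: t) s = (s, x) :: PySem.List.enumerate t (s + 1) := rfl

-- inserting an element that does not go before anything in D passes through D
lemma insertBy_through (x : List (String × String)) (D L : List (List (String × String)))
    (hD : ∀ e ∈ D, pvBef x e = false) :
    PySem.List.insertBy pvBef x (D ++ L) = D ++ PySem.List.insertBy pvBef x L := by
  induction D with
  | nil => simp
  | cons e D ih =>
    have he := hD e (by simp)
    simp [PySem.List.insertBy, he, ih (fun e' h' => hD e' (by simp [h']))]

-- the fixed low-priority suffix produced by the first four features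
def pvL0 (a b c d : String) : List (List (String × String)) :=
  [pvF c "Performance", pvF d "Performance", pvF a "Basic", pvF b "Basic"]

-- inserting all Delighter rows into D ++ pvL0 appends them, in order, at the end of D
lemma foldl_ins (a b c d : String) (xs : List String) :
    ∀ D : List (List (String × String)), (∀ e ∈ D, pvKey e = 3) →
    (xs.map (fun f => pvF f "Delighter")).foldl
      (fun acc x => PySem.List.insertBy pvBef x acc) (D ++ pvL0 a b c d)
      = D ++ xs.map (fun f => pvF f "Delighter") ++ pvL0 a b c d := by
  induction xs with
  | nil => intro D _; simp
  | cons x xs ih =>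
    intro D hD
    have h1 : PySem.List.insertBy pvBef (pvF x "Delighter") (D ++ pvL0 a b c d)
        = (D ++ [pvF x "Delighter"]) ++ pvL0 a b c d := by
      rw [insertBy_through _ _ _ (fun e he => by
        simp [pvBef, hD e he, pvKey_F_D])]
      simp [pvL0, PySem.List.insertBy, pvBef, pvKey_F_D, pvKey_F_P]
    have h2 := ih (D ++ [pvF x "Delighter"]) (by
      intro e he
      rcases (List.mem_append.mp he) with h | h
      · exact hD e h
      · simp at h; simp [h, pvKey_F_D])
    simp only [List.map_cons, List.foldl_cons, h1, h2]
    simp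

-- A's accumulation loop on indices ≥ 4 appends only Delighter rows
lemma resolvedA_tail (xs : List String) :
    ∀ (s : Int), 4 ≤ s → ∀ acc : List (List (String × String)),
    (PySem.List.enumerate xs s).foldl
      (fun acc p =>
        let klass := if p.1 < 2 then "Basic" else if p.1 < 4 then "Performance" else "Delighter"
        acc ++ [[("feature", p.2), ("score", klass)]]) acc
      = acc ++ xs.map (fun f => pvF f "Delighter") := by
  induction xs with
  | nil => intro s _ acc; simp [PySem.List.enumerate]
  | cons x xs ih =>
    intro s hs acc
    rw [enumerate_cons]
    have h2 : ¬ (s < 2) := by omega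
    have h4 : ¬ (s < 4) := by omega
    simp only [List.foldl_cons, h2, h4, if_false]
    rw [ih (s + 1) (by omega)]
    simp [pvF]

-- B's loop on indices ≥ 4 appends only to the delighter bucket
lemma altFold_tail (xs : List String) :
    ∀ (s : Int), 4 ≤ s →
    ∀ st : List (List (String × String)) × List (List (String × String)) × List (List (String × String)),
    (PySem.List.enumerate xs s).foldl
      (fun st p =>
        if p.1 < 2 then (st.1 ++ [[("feature", p.2), ("score", "Basic")]], st.2.1, st.2.2)
        else if p.1 < 4 then (st.1, st.2.1 ++ [[("feature", p.2), ("score", "Performance")]], st.2.2)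
        else (st.1, st.2.1, st.2.2 ++ [[("feature", p.2), ("score", "Delighter")]])) st
      = (st.1, st.2.1, st.2.2 ++ xs.map (fun f => pvF f "Delighter")) := by
  induction xs with
  | nil => intro s _ st; simp [PySem.List.enumerate]
  | cons x xs ih =>
    intro s hs st
    rw [enumerate_cons]
    have h2 : ¬ (s < 2) := by omega
    have h4 : ¬ (s < 4) := by omega
    simp only [List.foldl_cons, h2, h4, if_false]
    rw [ih (s + 1) (by omega)]
    simp [pvF]

lemma main_long (a b c d : String) (rest : List String) :
    resolve_kano_py (a :: b :: c :: d :: rest) = resolve_kano_py_alt (a :: b :: c :: d :: rest) := by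
  have hkey : (fun x => PySem.Dict.getD
        (PySem.Dict.ofList [("Delighter", (3 : Int)), ("Performance", 2), ("Basic", 1)])
        (PySem.Dict.getD (PySem.Dict.mk x) "score" "") 0) = pvKey :=
    funext (fun x => rfl)
  have h1 : (PySem.List.enumerate (a :: b :: c :: d :: rest) 0).foldl
      (fun acc p =>
        let klass := if p.1 < 2 then "Basic" else if p.1 < 4 then "Performance" else "Delighter"
        acc ++ [[("feature", p.2), ("score", klass)]]) []
      = (PySem.List.enumerate rest 4).foldl
      (fun acc p =>
        let klass := if p.1 < 2 then "Basic" else if p.1 < 4 then "Performance" else "Delighter"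
        acc ++ [[("feature", p.2), ("score", klass)]])
      [pvF a "Basic", pvF b "Basic", pvF c "Performance", pvF d "Performance"] := rfl
  have hA : resolve_kano_py (a :: b :: c :: d :: rest)
      = PySem.List.sorted
          ([pvF a "Basic", pvF b "Basic", pvF c "Performance", pvF d "Performance"]
            ++ rest.map (fun f => pvF f "Delighter")) pvKey true := by
    simp only [resolve_kano_py, hkey]
    congr 1
    rw [h1, resolvedA_tail rest 4 (by omega)]
  have h2 : (PySem.List.enumerate (a :: b :: c :: d :: rest) 0).foldl
      (fun (st : List (List (String × String)) × List (List (String × String)) × List (List (String × String))) p =>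
        if p.1 < 2 then (st.1 ++ [[("feature", p.2), ("score", "Basic")]], st.2.1, st.2.2)
        else if p.1 < 4 then (st.1, st.2.1 ++ [[("feature", p.2), ("score", "Performance")]], st.2.2)
        else (st.1, st.2.1, st.2.2 ++ [[("feature", p.2), ("score", "Delighter")]]))
      ([], [], [])
      = (PySem.List.enumerate rest 4).foldl
      (fun st p =>
        if p.1 < 2 then (st.1 ++ [[("feature", p.2), ("score", "Basic")]], st.2.1, st.2.2)
        else if p.1 < 4 then (st.1, st.2.1 ++ [[("feature", p.2), ("score", "Performance")]], st.2.2)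
        else (st.1, st.2.1, st.2.2 ++ [[("feature", p.2), ("score", "Delighter")]]))
      ([pvF a "Basic", pvF b "Basic"], [pvF c "Performance", pvF d "Performance"], []) := rfl
  have hB : resolve_kano_py_alt (a :: b :: c :: d :: rest)
      = rest.map (fun f => pvF f "Delighter") ++ pvL0 a b c d := by
    simp only [resolve_kano_py_alt]
    rw [h2, altFold_tail rest 4 (by omega)]
    simp [pvL0, pvF]
  rw [hA, hB, PySem.List.sorted_rev_eq_foldl_insertBy]
  have hbef : (fun (acc : List (List (String × String))) x =>
      PySem.List.insertBy (fun a b => decide (pvKey b < pvKey a)) x acc)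
      = fun acc x => PySem.List.insertBy pvBef x acc := by
    funext acc x; rfl
  rw [hbef, List.foldl_append]
  have hpre : ([pvF a "Basic", pvF b "Basic", pvF c "Performance", pvF d "Performance"]).foldl
      (fun acc x => PySem.List.insertBy pvBef x acc) [] = pvL0 a b c d := by
    simp [PySem.List.insertBy, pvBef, pvKey_F_B, pvKey_F_P, pvL0]
  rw [hpre]
  have := foldl_ins a b c d rest [] (by simp)
  simpa using this

-- ===== VERDICT (by name: the statement is the Claim_ definition above) =====
theorem resolve_kano_py_spec : Claim_equal_resolve_kano_py := by
  intro features _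
  show resolve_kano_py features = resolve_kano_py_alt features
  match features with
  | [] => rfl
  | [a] => rfl
  | [a, b] => rfl
  | [a, b, c] => rfl
  | [a, b, c, d] =>
    have := main_long a b c d []
    simpa using this
  | a :: b :: c :: d :: rest => exact main_long a b c d rest
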